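-- pv_equiv track=rewrite | github.com/SAFE-Action/SAFE-Action-Website | crawler/merge_enrichment.py | is_junk_email
-- ===== SOURCE A (Python) =====
-- JUNK_EMAIL_DOMAINS = [
--     'wixpress.com', 'squarespace.com', 'weebly.com', 'godaddy.com',
--     'wordpress.com', 'shopify.com', 'sentry.io', 'mailchimp.com',
--     'constantcontact.com', 'hubspot.com', 'example.com', 'test.com',
--     'localhost', 'herokuapp.com', 'netlify.app', 'vercel.app',
--     'amazonaws.com', 'googleusercontent.com'
-- ]
--
-- def is_junk_email(email):
--     if not email or '@' not in email:
--         return True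
--     local, domain = email.rsplit('@', 1)
--     domain = domain.lower()
--     for junk in JUNK_EMAIL_DOMAINS:
--         if domain == junk or domain.endswith('.' + junk):
--             return True
--     if len(local) > 16 and all(c in '0123456789abcdef' for c in local.lower()):
--         return True
--     return False
-- ===== SOURCE B (Python) =====
-- JUNK_EMAIL_DOMAINS = [
--     'wixpress.com', 'squarespace.com', 'weebly.com', 'godaddy.com',
--     'wordpress.com', 'shopify.com', 'sentry.io', 'mailchimp.com',
--     'constantcontact.com', 'hubspot.com', 'example.com', 'test.com',
--     'localhost', 'herokuapp.com', 'netlify.app', 'vercel.app',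
--     'amazonaws.com', 'googleusercontent.com'
-- ]
--
-- _JUNK_SET = frozenset(JUNK_EMAIL_DOMAINS)
-- _HEX_DIGITS = frozenset('0123456789abcdef')
--
--
-- def _tail_junk(suf):
--     """Recurse down the domain's characters; at each '.', test the remainder
--     against the junk set (covers every proper dot-boundary suffix)."""
--     if not suf:
--         return False
--     rest = suf[1:]
--     if suf[0] == '.' and rest in _JUNK_SET:
--         return True
--     return _tail_junk(rest)
--
--
-- def _junk_domain(domain):
--     return domain in _JUNK_SET or _tail_junk(domain)
--
--
-- def _hexy_local(local):
--     return len(local) > 16 and all(c in _HEX_DIGITS for c in local.lower())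
--
--
-- def is_junk_email(email):
--     if email is None or '@' not in email:
--         return True
--     local, _, domain = email.rpartition('@')
--     return _junk_domain(domain.lower()) or _hexy_local(local)
-- ===== Notes on version B (the rewrite author's own statement) =====
-- stated objective: alternative
-- what changed: B hashes the 18 junk domains into a frozenset once and recursively walks the candidate domain's own characters, testing the remainder against the set at each dot boundary, instead of scanning the whole junk list with == / endswith; the function body is a flat boolean combination of small helpers rather than A's if/return chain.
import Mathlib
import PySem

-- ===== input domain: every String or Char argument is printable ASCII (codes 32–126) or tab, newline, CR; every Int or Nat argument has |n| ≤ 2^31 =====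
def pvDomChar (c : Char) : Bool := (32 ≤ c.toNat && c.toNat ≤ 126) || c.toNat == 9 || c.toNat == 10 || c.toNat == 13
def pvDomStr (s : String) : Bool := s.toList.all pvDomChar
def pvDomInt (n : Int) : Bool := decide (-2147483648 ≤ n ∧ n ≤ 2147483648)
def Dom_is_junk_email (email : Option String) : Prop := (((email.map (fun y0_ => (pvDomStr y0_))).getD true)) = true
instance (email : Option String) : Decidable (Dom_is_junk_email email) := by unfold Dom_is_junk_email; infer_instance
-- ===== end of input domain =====

-- B hashes the junk domains into a set and recursively walks the email domain's own
-- characters, testing the remainder at each dot boundary, instead of scanning the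
-- junk list with == / endswith (alternative decomposition, same cost in practice).

-- ===== PORT A =====
-- shared module constant JUNK_EMAIL_DOMAINS
def junkEmailDomains : List (List Char) :=
  ["wixpress.com".toList, "squarespace.com".toList, "weebly.com".toList, "godaddy.com".toList,
   "wordpress.com".toList, "shopify.com".toList, "sentry.io".toList, "mailchimp.com".toList,
   "constantcontact.com".toList, "hubspot.com".toList, "example.com".toList, "test.com".toList,
   "localhost".toList, "herokuapp.com".toList, "netlify.app".toList, "vercel.app".toList,
   "amazonaws.com".toList, "googleusercontent.com".toList]

def is_junk_email (email : Option String) : Bool :=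
  match email with
  | none => true
  | some s =>
    let cs := s.toList
    if cs.isEmpty || !(PySem.Chars.isIn ['@'] cs) then true
    else
      -- rsplit('@', 1) ported by hand via the last '@' (exact: '@' is present, so rfind ≥ 0)
      let k := (PySem.Chars.rfind cs ['@']).toNat
      let lcl := cs.take k
      let domain := PySem.Chars.lower (cs.drop (k + 1))
      if junkEmailDomains.any (fun j => domain == j || PySem.Chars.endswith domain ('.' :: j)) then
        true
      else if decide (lcl.length > 16)
              && (PySem.Chars.lower lcl).all (fun c => PySem.Chars.isIn [c] "0123456789abcdef".toList) then
        true
      else false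

-- ===== PORT B =====
def junkEmailSet : PySem.Set (List Char) := PySem.Set.ofList junkEmailDomains

def hexDigitSet : PySem.Set Char := PySem.Set.ofList "0123456789abcdef".toList

-- _tail_junk: recurse down the domain; at each '.', test the remainder against the set
def tailJunk : List Char → Bool
  | [] => false
  | c :: rest => (c == '.' && PySem.Set.contains junkEmailSet rest) || tailJunk rest

def junkDomain (d : List Char) : Bool :=
  PySem.Set.contains junkEmailSet d || tailJunk d

def hexyLocal (lcl : List Char) : Bool :=
  decide (lcl.length > 16) && (PySem.Chars.lower lcl).all (fun c => PySem.Set.contains hexDigitSet c)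

def is_junk_email_alt (email : Option String) : Bool :=
  match email with
  | none => true
  | some s =>
    let cs := s.toList
    if PySem.Chars.isIn ['@'] cs then
      -- rpartition('@') ported by hand via the last '@' (exact: '@' is present, so rfind ≥ 0)
      let k := (PySem.Chars.rfind cs ['@']).toNat
      junkDomain (PySem.Chars.lower (cs.drop (k + 1))) || hexyLocal (cs.take k)
    else true

-- ===== PRECONDITION & SPEC =====
def Spec_is_junk_email (email : Option String) (out : Bool) : Prop := out = is_junk_email_alt email
instance (email : Option String) (out : Bool) : Decidable (Spec_is_junk_email email out) := by unfold Spec_is_junk_email; infer_instance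

-- ===== CLAIM (what is proved, stated in full; the proofs are below) =====
def Claim_equal_is_junk_email : Prop := ∀ (email : Option String), Dom_is_junk_email email → Spec_is_junk_email email (is_junk_email email)

-- ===== LEMMAS AND PROOFS =====

-- a one-element list is an infix iff its element is a member
theorem singleton_infix_iff (c : Char) (l : List Char) : [c] <:+: l ↔ c ∈ l := by
  constructor
  · intro h
    exact (List.singleton_sublist.mp h.sublist)
  · intro h
    obtain ⟨s, t, rfl⟩ := List.append_of_mem h
    exact ⟨s, t, by simp⟩

-- per-character agreement of the two hex-membership tests
theorem hex_mem_eq (c : Char) :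
    PySem.Chars.isIn [c] "0123456789abcdef".toList = PySem.Set.contains hexDigitSet c := by
  rw [Bool.eq_iff_iff, PySem.Chars.isIn_iff_infix, singleton_infix_iff, PySem.Set.contains_iff]
  unfold hexDigitSet
  rw [PySem.Set.mem_ofList]

-- B's recursive dot-boundary walk finds exactly the '.'-prefixed suffixes in the junk set
theorem tailJunk_iff (d : List Char) :
    tailJunk d = true ↔ ∃ j ∈ junkEmailDomains, ('.' :: j) <:+ d := by
  induction d with
  | nil =>
    simp only [tailJunk]
    constructor
    · intro h; exact absurd h (by decide)
    · rintro ⟨j, _, t, ht⟩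
      exact absurd (congrArg List.length ht) (by simp)
  | cons c rest ih =>
    simp only [tailJunk, Bool.or_eq_true, Bool.and_eq_true, beq_iff_eq,
      PySem.Set.contains_iff, junkEmailSet, PySem.Set.mem_ofList, ih]
    constructor
    · rintro (⟨hc, hj⟩ | ⟨j, hj, hsuf⟩)
      · exact ⟨rest, hj, by rw [hc]⟩
      · exact ⟨j, hj, hsuf.trans (List.suffix_cons c rest)⟩
    · rintro ⟨j, hj, hsuf⟩
      rcases List.suffix_cons_iff.mp hsuf with heq | hsuf'
      · exact Or.inl ⟨(List.cons.injEq _ _ _ _ ▸ heq).1.symm, (List.cons.injEq _ _ _ _ ▸ heq).2 ▸ hj⟩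
      · exact Or.inr ⟨j, hj, hsuf'⟩

-- the heart: A's junk-list scan equals B's set-membership + recursive suffix walk
theorem junk_scan_eq (d : List Char) :
    junkEmailDomains.any (fun j => d == j || PySem.Chars.endswith d ('.' :: j)) = junkDomain d := by
  rw [Bool.eq_iff_iff]
  unfold junkDomain
  simp only [List.any_eq_true, Bool.or_eq_true, beq_iff_eq, PySem.Chars.endswith_iff,
    PySem.Set.contains_iff, junkEmailSet, PySem.Set.mem_ofList, tailJunk_iff]
  constructor
  · rintro ⟨j, hj, hdj | hsuf⟩
    · exact Or.inl (hdj ▸ hj)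
    · exact Or.inr ⟨j, hj, hsuf⟩
  · rintro (hd | ⟨j, hj, hsuf⟩)
    · exact ⟨d, hd, Or.inl rfl⟩
    · exact ⟨j, hj, Or.inr hsuf⟩

-- Bool bridge between A's if-chain and B's disjunction
theorem ite_bridge (c h : Bool) :
    (if c = true then true else if h = true then true else false) = (c || h) := by
  cases c <;> cases h <;> rfl

-- the two hex-local tests agree
theorem hex_all_eq (l : List Char) :
    l.all (fun c => PySem.Chars.isIn [c] "0123456789abcdef".toList)
      = l.all (fun c => PySem.Set.contains hexDigitSet c) := by
  induction l with
  | nil => rfl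
  | cons c cs ih => simp only [List.all_cons, hex_mem_eq c, ih]

-- ===== VERDICT (by name: the statement is the Claim_ definition above) =====
theorem is_junk_email_spec : Claim_equal_is_junk_email := by
  intro email _
  unfold Spec_is_junk_email is_junk_email is_junk_email_alt
  match email with
  | none => rfl
  | some s =>
    simp only
    by_cases hin : PySem.Chars.isIn ['@'] s.toList = true
    · have hne : s.toList.isEmpty = false := by
        cases h : s.toList with
        | nil => rw [h] at hin; exact absurd hin (by decide)
        | cons a t => rfl
      rw [hne, hin]
      simp only [Bool.not_true, Bool.or_false, if_neg (by decide : ¬ false = true)]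
      rw [junk_scan_eq, hex_all_eq]
      exact ite_bridge _ _
    · simp [hin]
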